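-- pv_equiv track=rewrite | github.com/vishrutkmr7/DailyPracticeProblemsDIP | 2022/06 June/db06042022.py | num_jewel_stones
-- ===== SOURCE A (Python) =====
-- def num_jewel_stones(jewels, stones):
--     """
--     This is a brute force solution.
--     """
--     if len(jewels) == 0 or len(stones) == 0:
--         return 0
--     if len(jewels) == 1:
--         return stones.count(jewels)
--     if len(stones) == 1:
--         return jewels.count(stones)
--     for i in range(len(jewels)):
--         for j in range(len(stones)):
--             if jewels[i] == stones[j]:
--                 return 1 + num_jewel_stones(jewels, stones[j + 1 :])
--     return 0
-- ===== SOURCE B (Python) =====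
-- def num_jewel_stones(jewels, stones):
--     n = len(stones)
--     # nxt[p] maps each character to its first index in stones[p:]
--     nxt = [None] * (n + 1)
--     nxt[n] = {}
--     for p in range(n - 1, -1, -1):
--         d = dict(nxt[p + 1])
--         d[stones[p]] = p
--         nxt[p] = d
--     total = 0
--     p = 0
--     while p < n:
--         for c in jewels:
--             if c in nxt[p]:
--                 total += 1
--                 p = nxt[p][c] + 1
--                 break
--         else:
--             break
--     return total
-- ===== Notes on version B (the rewrite author's own statement) =====
-- stated objective: alternative
-- what changed: Replaces A's recursion with string slicing and a nested jewels-by-stones rescan at every step by a next-occurrence table precomputed once over stones plus a single iterative index loop; Pre_ excludes jewels with repeated characters (outside the problem's premise that jewels are distinct), where A's count-based base cases can count the last remaining stone once per duplicate jewel while B counts each stone at most once.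
-- outside the precondition, e.g. on num_jewel_stones('aab', 'aa'): A returns 3, B returns 2
import Mathlib
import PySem

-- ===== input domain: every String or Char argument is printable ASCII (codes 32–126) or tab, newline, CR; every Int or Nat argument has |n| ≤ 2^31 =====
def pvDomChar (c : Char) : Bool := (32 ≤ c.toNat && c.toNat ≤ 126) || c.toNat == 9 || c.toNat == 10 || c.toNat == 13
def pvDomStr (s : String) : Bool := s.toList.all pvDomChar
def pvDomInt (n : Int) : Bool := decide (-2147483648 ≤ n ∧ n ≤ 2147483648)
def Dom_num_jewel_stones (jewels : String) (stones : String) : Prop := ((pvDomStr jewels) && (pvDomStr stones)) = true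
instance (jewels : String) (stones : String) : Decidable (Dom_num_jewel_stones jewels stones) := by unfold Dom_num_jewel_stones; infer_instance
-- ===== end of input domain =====

-- B replaces A's recursion-with-slicing and nested rescans by one precomputed
-- next-occurrence table and a single iterative index loop (objective: alternative).

-- ===== PORT A =====
-- inner loop `for j in range(len(stones)): if jewels[i] == stones[j]: …` (first match)
def findInStones (c : Char) : List Char → Option Nat
  | [] => none
  | s :: rest => if c == s then some 0 else (findInStones c rest).map (· + 1)

-- outer loop `for i in range(len(jewels)): …` returning the first j found
def findPair : List Char → List Char → Option Nat
  | [], _ => none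
  | jc :: jrest, stones =>
    match findInStones jc stones with
    | some j => some j
    | none => findPair jrest stones

def numJewelRec (jewels : List Char) (stones : List Char) : Int :=
  if _h0 : jewels.length = 0 ∨ stones.length = 0 then 0
  else if jewels.length = 1 then (stones.count (jewels.getD 0 ' ') : Int)
  else if stones.length = 1 then (jewels.count (stones.getD 0 ' ') : Int)
  else
    match findPair jewels stones with
    | some j => 1 + numJewelRec jewels (stones.drop (j + 1))
    | none => 0
termination_by stones.length
decreasing_by
  simp only [List.length_drop]
  omega

def num_jewel_stones (jewels : String) (stones : String) : Int :=
  numJewelRec jewels.toList stones.toList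

-- ===== PORT B =====
-- `for p in range(n-1,-1,-1): d = dict(nxt[p+1]); d[stones[p]] = p; nxt[p] = d`
-- built back-to-front; list index p holds the table for the suffix stones[p:]
def nextTable : List Char → Nat → List (PySem.Dict Char Nat)
  | [], _ => [PySem.Dict.empty]
  | c :: rest, p =>
    let tail := nextTable rest (p + 1)
    (tail.headD PySem.Dict.empty).insert c p :: tail

-- `for c in jewels: if c in nxt[p]: …; break` — first jewel present in the suffix
def lookupJ : List Char → PySem.Dict Char Nat → Option Nat
  | [], _ => none
  | c :: rest, d =>
    match d.get? c with
    | some j => some j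
    | none => lookupJ rest d

-- the `while p < n` loop; fuel = n suffices since p strictly increases each step
def bLoop (jewels stones : List Char) (nxt : List (PySem.Dict Char Nat)) :
    Nat → Nat → Int → Int
  | 0, _, total => total
  | fuel + 1, p, total =>
    if p < stones.length then
      match lookupJ jewels (nxt.getD p PySem.Dict.empty) with
      | none => total
      | some j => bLoop jewels stones nxt fuel (j + 1) (total + 1)
    else total

def num_jewel_stones_alt (jewels : String) (stones : String) : Int :=
  let J := jewels.toList
  let S := stones.toList
  bLoop J S (nextTable S 0) S.length 0 0

-- ===== PRECONDITION & SPEC =====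
-- Pre_ excludes jewels with repeated characters — outside the problem's premise that
-- jewels are distinct — where A's count-based base cases can count the last remaining
-- stone once per duplicate jewel, an accident neither behaviour is specified for.
def Pre_num_jewel_stones (jewels : String) (stones : String) : Prop :=
  jewels.toList.Nodup
instance (jewels : String) (stones : String) : Decidable (Pre_num_jewel_stones jewels stones) := by unfold Pre_num_jewel_stones; infer_instance

def pvWitness_num_jewel_stones : String × String := ("ab", "aab")

def Spec_num_jewel_stones (jewels : String) (stones : String) (out : Int) : Prop := out = num_jewel_stones_alt jewels stones
instance (jewels : String) (stones : String) (out : Int) : Decidable (Spec_num_jewel_stones jewels stones out) := by unfold Spec_num_jewel_stones; infer_instance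

-- ===== CLAIM (what is proved, stated in full; the proofs are below) =====
def Claim_equal_num_jewel_stones : Prop := ∀ (jewels : String) (stones : String), Dom_num_jewel_stones jewels stones → Pre_num_jewel_stones jewels stones → Spec_num_jewel_stones jewels stones (num_jewel_stones jewels stones)

-- ===== LEMMAS AND PROOFS =====

-- the dict at list index p of the table built from offset q answers queries about T.drop p
lemma getD_nextTable (T : List Char) (q p : Nat) (c : Char) :
    ((nextTable T q).getD p PySem.Dict.empty).get? c
      = (findInStones c (T.drop p)).map (· + (q + p)) := by
  induction T generalizing q p with
  | nil =>
    cases p <;> simp [nextTable, findInStones, PySem.Dict.get?_empty]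
  | cons a rest ih =>
    cases p with
    | zero =>
      simp only [nextTable, List.getD_cons_zero, List.drop_zero, findInStones]
      rw [PySem.Dict.get?_insert]
      by_cases hc : c = a
      · simp [hc]
      · have hb : (c == a) = false := by simp [hc]
        simp only [hc, hb, Bool.false_eq_true, if_false]
        have htail : ((nextTable rest (q + 1)).headD PySem.Dict.empty).get? c
            = (findInStones c rest).map (· + (q + 1)) := by
          have h0 := ih (q + 1) 0
          simpa [List.getD_eq_getElem?_getD, List.headD_eq_head?_getD,
                 List.head?_eq_getElem?] using h0
        rw [htail]
        cases findInStones c rest <;> simp <;> omega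
    | succ p' =>
      simp only [nextTable, List.getD_cons_succ, List.drop_succ_cons]
      have := ih (q + 1) p'
      rw [this]
      cases findInStones c (rest.drop p') <;> simp <;> omega

lemma lookupJ_eq (jewels : List Char) (d : PySem.Dict Char Nat) (T : List Char) (f : Nat → Nat)
    (h : ∀ c, d.get? c = (findInStones c T).map f) :
    lookupJ jewels d = (findPair jewels T).map f := by
  induction jewels with
  | nil => simp [lookupJ, findPair]
  | cons jc jrest ih =>
    simp only [lookupJ, findPair, h jc]
    cases findInStones jc T <;> simp [ih]

lemma findInStones_none_count (c : Char) (l : List Char)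
    (h : findInStones c l = none) : l.count c = 0 := by
  induction l with
  | nil => simp
  | cons s rest ih =>
    simp only [findInStones] at h
    by_cases hc : c = s
    · simp [hc] at h
    · have hb : (c == s) = false := by simp [hc]
      simp only [hb, Bool.false_eq_true, if_false, Option.map_eq_none_iff] at h
      simp [List.count_cons, ih h, Ne.symm hc]

lemma findInStones_some_count (c : Char) (l : List Char) (j : Nat)
    (h : findInStones c l = some j) :
    l.count c = 1 + (l.drop (j + 1)).count c := by
  induction l generalizing j with
  | nil => simp [findInStones] at h
  | cons s rest ih =>
    simp only [findInStones] at h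
    by_cases hc : c = s
    · simp only [hc, beq_self_eq_true, if_true, Option.some.injEq] at h
      subst h
      simp only [hc, List.drop_succ_cons, List.drop_zero, List.count_cons, beq_self_eq_true,
        if_true]
      omega
    · have hb : (c == s) = false := by simp [hc]
      simp only [hb, Bool.false_eq_true, if_false] at h
      cases hf : findInStones c rest with
      | none => simp [hf] at h
      | some j' =>
        rw [hf] at h
        simp only [Option.map_some, Option.some.injEq] at h
        subst h
        simp [List.count_cons, Ne.symm hc, ih j' hf]

lemma findInStones_some_lt (c : Char) (l : List Char) (j : Nat)
    (h : findInStones c l = some j) : j < l.length := by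
  induction l generalizing j with
  | nil => simp [findInStones] at h
  | cons s rest ih =>
    simp only [findInStones] at h
    by_cases hc : c = s
    · simp only [hc, beq_self_eq_true, if_true, Option.some.injEq] at h
      simp only [List.length_cons]
      omega
    · have hb : (c == s) = false := by simp [hc]
      simp only [hb, Bool.false_eq_true, if_false] at h
      cases hf : findInStones c rest with
      | none => simp [hf] at h
      | some j' =>
        rw [hf] at h
        simp only [Option.map_some, Option.some.injEq] at h
        have := ih j' hf
        simp only [List.length_cons]
        omega

lemma findPair_singleton (J : List Char) (a : Char) :
    findPair J [a] = if a ∈ J then some 0 else none := by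
  induction J with
  | nil => simp [findPair]
  | cons jc jrest ih =>
    simp only [findPair, findInStones]
    by_cases h : jc = a
    · simp [h]
    · have hb : (jc == a) = false := by simp [h]
      simp only [hb, Bool.false_eq_true, if_false, findInStones, Option.map_none]
      rw [ih]
      simp [List.mem_cons, Ne.symm h]

lemma numJewelRec_single (c : Char) (l : List Char) :
    numJewelRec [c] l = (l.count c : Int) := by
  rw [numJewelRec]
  rcases l with _ | ⟨a, rest⟩
  · simp
  · rw [dif_neg (by simp), if_pos (by simp)]
    simp

lemma bLoop_eq (J S : List Char) (hnd : J.Nodup) :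
    ∀ (fuel p : Nat) (total : Int), S.length - p ≤ fuel →
      bLoop J S (nextTable S 0) fuel p total
        = total + numJewelRec J (S.drop p) := by
  intro fuel
  induction fuel with
  | zero =>
    intro p total hf
    have hdrop : S.drop p = [] := by
      apply List.drop_eq_nil_of_le; omega
    rw [hdrop]
    unfold numJewelRec
    simp [bLoop]
  | succ fuel ih =>
    intro p total hf
    rw [show bLoop J S (nextTable S 0) (fuel + 1) p total
        = if p < S.length then
            match lookupJ J ((nextTable S 0).getD p PySem.Dict.empty) with
            | none => total
            | some j => bLoop J S (nextTable S 0) fuel (j + 1) (total + 1)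
          else total from rfl]
    by_cases hp : p < S.length
    · rw [if_pos hp]
      have hget : ∀ c, ((nextTable S 0).getD p PySem.Dict.empty).get? c
          = (findInStones c (S.drop p)).map (· + p) := by
        intro c
        simpa using getD_nextTable S 0 p c
      rw [lookupJ_eq J _ (S.drop p) _ hget]
      have hslen : (S.drop p).length = S.length - p := by simp
      match J, hnd with
      | [], _ =>
        simp only [findPair, Option.map_none]
        rw [show numJewelRec [] (S.drop p) = 0 from by rw [numJewelRec]; simp]
        simp
      | [c], _ =>
        have hfp : findPair [c] (S.drop p) = findInStones c (S.drop p) := by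
          simp only [findPair]
          cases findInStones c (S.drop p) <;> simp [findPair]
        rw [hfp, numJewelRec_single]
        cases hfi : findInStones c (S.drop p) with
        | none =>
          simp only [Option.map_none]
          rw [findInStones_none_count c _ hfi]
          simp
        | some j =>
          simp only [Option.map_some]
          have hlt := findInStones_some_lt c _ j hfi
          rw [ih (j + p + 1) (total + 1) (by omega)]
          rw [numJewelRec_single]
          have hdd : (S.drop p).drop (j + 1) = S.drop (j + p + 1) := by
            rw [List.drop_drop]; ring_nf
          have := findInStones_some_count c (S.drop p) j hfi
          rw [hdd] at this
          rw [this]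
          push_cast
          ring
      | c₁ :: c₂ :: Jr, hnd =>
        set J' := c₁ :: c₂ :: Jr with hJ'
        have hJ2 : 2 ≤ J'.length := by simp [hJ']
        by_cases hs1 : S.length - p = 1
        · obtain ⟨a, ha⟩ := List.length_eq_one_iff.mp (by omega : (S.drop p).length = 1)
          rw [ha, findPair_singleton]
          have hJl : J'.length = Jr.length + 2 := by rw [hJ']; simp
          rw [show numJewelRec J' [a]
              = if h0 : J'.length = 0 ∨ ([a] : List Char).length = 0 then 0
                else if J'.length = 1 then ((([a] : List Char)).count (J'.getD 0 ' ') : Int)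
                else if ([a] : List Char).length = 1 then (J'.count (([a] : List Char).getD 0 ' ') : Int)
                else
                  match findPair J' [a] with
                  | some j => 1 + numJewelRec J' (([a] : List Char).drop (j + 1))
                  | none => 0 from by rw [numJewelRec]]
          rw [dif_neg (show ¬(J'.length = 0 ∨ ([a] : List Char).length = 0) by rw [hJl]; simp),
              if_neg (show ¬ J'.length = 1 by rw [hJl]; omega),
              if_pos (show ([a] : List Char).length = 1 from rfl)]
          simp only [List.getD_cons_zero]
          by_cases hm : a ∈ J'
          · rw [if_pos hm]
            simp only [Option.map_some, Nat.zero_add]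
            rw [ih (p + 1) (total + 1) (by omega)]
            have hdrop1 : S.drop (p + 1) = [] := by
              apply List.drop_eq_nil_of_le; omega
            rw [hdrop1]
            rw [show numJewelRec J' [] = 0 from by rw [numJewelRec]; simp]
            have : J'.count a = 1 := List.count_eq_one_of_mem hnd hm
            simp [this]
          · rw [if_neg hm]
            simp only [Option.map_none]
            have : J'.count a = 0 := List.count_eq_zero_of_not_mem hm
            simp [this]
        · have hs2 : 2 ≤ S.length - p := by omega
          rw [show numJewelRec J' (S.drop p)
              = if h0 : J'.length = 0 ∨ (S.drop p).length = 0 then 0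
                else if J'.length = 1 then ((S.drop p).count (J'.getD 0 ' ') : Int)
                else if (S.drop p).length = 1 then (J'.count ((S.drop p).getD 0 ' ') : Int)
                else
                  match findPair J' (S.drop p) with
                  | some j => 1 + numJewelRec J' ((S.drop p).drop (j + 1))
                  | none => 0 from by rw [numJewelRec]]
          rw [dif_neg (by omega : ¬(J'.length = 0 ∨ (S.drop p).length = 0)),
              if_neg (by omega : ¬ J'.length = 1),
              if_neg (by rw [hslen]; omega : ¬ (S.drop p).length = 1)]
          cases hfp : findPair J' (S.drop p) with
          | none => simp
          | some j =>
            simp only [Option.map_some]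
            have hdd : (S.drop p).drop (j + 1) = S.drop (j + p + 1) := by
              rw [List.drop_drop]; ring_nf
            rw [ih (j + p + 1) (total + 1) (by omega)]
            rw [hdd]
            ring
    · rw [if_neg hp]
      have hdrop : S.drop p = [] := by
        apply List.drop_eq_nil_of_le; omega
      rw [hdrop]
      unfold numJewelRec
      simp

-- ===== VERDICT (by name: the statement is the Claim_ definition above) =====
theorem num_jewel_stones_spec : Claim_equal_num_jewel_stones := by
  intro jewels stones _ hpre
  unfold Spec_num_jewel_stones num_jewel_stones num_jewel_stones_alt
  rw [bLoop_eq jewels.toList stones.toList hpre stones.toList.length 0 0 (by omega)]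
  simp only [List.drop_zero, zero_add]
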